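-- pv_equiv track=rewrite | github.com/kdy1994kko/GCU-CST-201-O500-Algorithms-and-Data-Structures | DQ's/heap.py | delete_min_from_max_heap
-- ===== SOURCE A (Python) =====
-- def delete_min_from_max_heap(heap):
--     # Deletes and returns the minimum element from a max-heap (unusual operation)
--     if not heap:
--         return None
--
--     n = len(heap)
--     start = n // 2  # Start index of leaf nodes
--     min_index = start
--
--     # Find the minimum among the leaf nodes
--     for i in range(start + 1, n):
--         if heap[i] < heap[min_index]:
--             min_index = i
--
--     min_element = heap[min_index]
--
--     # Swap with last element and remove
--     heap[min_index], heap[-1] = heap[-1], heap[min_index]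
--     heap.pop()
--
--     # Restore max-heap property if needed (overwrites same heapify_down name)
--     heapify_down(heap, min_index)
--
--     return min_element
--
-- def heapify_down(H, i):
--     # Push down the element at index i to restore min-heap property
--     n = len(H)
--     while i < n:
--         left = 2 * i + 1
--         right = 2 * i + 2
--         smallest = i
--
--         if left < n and H[left] < H[smallest]:
--             smallest = left
--         if right < n and H[right] < H[smallest]:
--             smallest = right
--
--         if smallest == i:
--             break
--
--         H[i], H[smallest] = H[smallest], H[i]
--         i = smallest
-- ===== SOURCE B (Python) =====
-- def delete_min_from_max_heap(heap):
--     # Same operation, different decomposition: the leaf minimum is taken with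
--     # min() on the leaf slice (value first, then its first index), and the
--     # sift-down is a recursive helper instead of A's iterative while loop.
--     if not heap:
--         return None
--     n = len(heap)
--     start = n // 2
--     leaves = heap[start:]
--     min_element = min(leaves)
--     min_index = start + leaves.index(min_element)
--     heap[min_index], heap[-1] = heap[-1], heap[min_index]
--     heap.pop()
--     _sift_down(heap, min_index)
--     return min_element
--
-- def _sift_down(H, i):
--     n = len(H)
--     if i >= n:
--         return
--     left = 2 * i + 1
--     right = 2 * i + 2
--     smallest = i
--     if left < n and H[left] < H[smallest]:
--         smallest = left
--     if right < n and H[right] < H[smallest]: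
--         smallest = right
--     if smallest != i:
--         H[i], H[smallest] = H[smallest], H[i]
--         _sift_down(H, smallest)
-- ===== Notes on version B (the rewrite author's own statement) =====
-- stated objective: alternative
-- what changed: The leaf scan for the minimum index is replaced by min() over the leaf slice followed by a first-index lookup, and the iterative while-loop sift-down helper is rewritten as a recursive sift-down.
import Mathlib
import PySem

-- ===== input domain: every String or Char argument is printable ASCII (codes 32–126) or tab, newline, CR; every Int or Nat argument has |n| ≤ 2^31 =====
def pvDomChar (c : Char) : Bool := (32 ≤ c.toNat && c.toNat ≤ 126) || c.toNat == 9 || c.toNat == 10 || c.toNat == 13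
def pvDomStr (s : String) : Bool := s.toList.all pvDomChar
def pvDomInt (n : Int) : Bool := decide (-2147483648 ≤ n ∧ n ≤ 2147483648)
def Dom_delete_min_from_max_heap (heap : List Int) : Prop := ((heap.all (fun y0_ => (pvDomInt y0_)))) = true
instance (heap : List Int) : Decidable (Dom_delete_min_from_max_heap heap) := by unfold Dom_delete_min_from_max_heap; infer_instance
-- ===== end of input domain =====

-- B replaces A's index scan over the leaves by min() on the leaf slice plus a first-index
-- lookup, and A's iterative while-loop heapify_down by a recursive sift-down (objective:
-- alternative). Both Pythons mutate `heap` in place identically; the equivalence proved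
-- here is about the RETURN value.

-- ===== PORT A =====
-- tuple swap H[i], H[j] = H[j], H[i]; exact for indices in [-n, n) (the only calls A makes)
def pvSwapA (H : List Int) (i j : Int) : List Int :=
  let i' := if i < 0 then i + H.length else i
  let j' := if j < 0 then j + H.length else j
  (H.set i'.toNat (PySem.List.pyGetD H j 0)).set j'.toNat (PySem.List.pyGetD H i 0)

-- while-loop of A's heapify_down; fuel only makes the loop total (i strictly increases,
-- so H.length + 1 steps always suffice)
def heapifyDownA (H : List Int) (i : Int) (fuel : Nat) : List Int :=
  match fuel with
  | 0 => H
  | fuel + 1 =>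
    let n : Int := H.length
    if i < n then
      let left := 2 * i + 1
      let right := 2 * i + 2
      let s1 := if left < n ∧ PySem.List.pyGetD H left 0 < PySem.List.pyGetD H i 0 then left else i
      let s2 := if right < n ∧ PySem.List.pyGetD H right 0 < PySem.List.pyGetD H s1 0 then right else s1
      if s2 = i then H
      else heapifyDownA (pvSwapA H i s2) s2 fuel
    else H

def delete_min_from_max_heap (heap : List Int) : Option Int :=
  if heap = [] then none
  else
    let n : Int := heap.length
    let start : Int := PySem.Int.floordiv n 2
    let min_index := (PySem.List.pyRange (start + 1) n 1).foldl
      (fun mi i => if PySem.List.pyGetD heap i 0 < PySem.List.pyGetD heap mi 0 then i else mi) start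
    let min_element := PySem.List.pyGetD heap min_index 0
    -- in-place part (invisible in the returned value): swap with last, pop, heapify_down
    let h1 := pvSwapA heap min_index (-1)
    let h2 := h1.dropLast
    let _ := heapifyDownA h2 min_index (h2.length + 1)
    some min_element

-- ===== PORT B =====
-- recursive sift-down of Source B; the fuel argument only makes the recursion total
-- (each call strictly increases i below the length, so H.length + 1 calls suffice)
def pvSiftDownB (H : List Int) (i : Nat) (fuel : Nat) : List Int :=
  match fuel with
  | 0 => H
  | fuel + 1 =>
    let n := H.length
    if i < n then
      let left := 2 * i + 1
      let right := 2 * i + 2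
      let s1 := if left < n ∧ H.getD left 0 < H.getD i 0 then left else i
      let s2 := if right < n ∧ H.getD right 0 < H.getD s1 0 then right else s1
      if s2 = i then H
      else pvSiftDownB ((H.set i (H.getD s2 0)).set s2 (H.getD i 0)) s2 fuel
    else H

def delete_min_from_max_heap_alt (heap : List Int) : Option Int :=
  if heap = [] then none
  else
    let n := heap.length
    let start := n / 2
    let leaves := heap.drop start                                  -- heap[start:]
    let min_element := (PySem.List.min? leaves (fun x => x)).getD 0  -- min(leaves); leaves ≠ [] here
    let min_index := start + (PySem.List.index? leaves min_element).getD 0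
    -- in-place part (invisible in the returned value): swap with last, pop, sift down
    let h1 := (heap.set min_index (heap.getD (n - 1) 0)).set (n - 1) (heap.getD min_index 0)
    let h2 := h1.dropLast
    let _ := pvSiftDownB h2 min_index (h2.length + 1)
    some min_element

-- ===== PRECONDITION & SPEC =====
def Spec_delete_min_from_max_heap (heap : List Int) (out : Option Int) : Prop := out = delete_min_from_max_heap_alt heap
instance (heap : List Int) (out : Option Int) : Decidable (Spec_delete_min_from_max_heap heap out) := by unfold Spec_delete_min_from_max_heap; infer_instance

-- ===== CLAIM (what is proved, stated in full; the proofs are below) =====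
def Claim_equal_delete_min_from_max_heap : Prop := ∀ (heap : List Int), Dom_delete_min_from_max_heap heap → Spec_delete_min_from_max_heap heap (delete_min_from_max_heap heap)

-- ===== LEMMAS AND PROOFS =====

-- A's index-selecting fold, read through the list: the value at the resulting index is the
-- running minimum of the values at the scanned indices.
theorem pv_val_of_index_fold (h : List Int) (ys : List Int) (mi : Int) :
    PySem.List.pyGetD h
      (ys.foldl (fun mi i => if PySem.List.pyGetD h i 0 < PySem.List.pyGetD h mi 0 then i else mi) mi) 0
    = ys.foldl (fun a i => if PySem.List.pyGetD h i 0 < a then PySem.List.pyGetD h i 0 else a)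
        (PySem.List.pyGetD h mi 0) := by
  induction ys generalizing mi with
  | nil => rfl
  | cons y t ih =>
    simp only [List.foldl_cons]
    rw [ih]
    by_cases hy : PySem.List.pyGetD h y 0 < PySem.List.pyGetD h mi 0 <;> simp [hy]

theorem pv_foldl_if_lt_eq_min (t : List Int) (v : Int) :
    t.foldl (fun a i => if i < a then i else a) v = t.foldl min v := by
  have : (fun (a i : Int) => if i < a then i else a) = min := by
    funext a i; rw [Int.min_def]; split_ifs <;> omega
  rw [this]

theorem delete_min_spec_aux (heap : List Int) (hne : heap ≠ []) :
    delete_min_from_max_heap heap = delete_min_from_max_heap_alt heap := by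
  unfold delete_min_from_max_heap delete_min_from_max_heap_alt
  simp only [hne, ite_false]
  set st := heap.length / 2 with hst
  have hlen : 0 < heap.length := List.length_pos_iff.mpr hne
  have hstlt : st < heap.length := by omega
  -- the two start values agree
  have hstart : PySem.Int.floordiv (heap.length : Int) 2 = (st : Int) := by
    exact_mod_cast PySem.Int.floordiv_natCast heap.length 2
  rw [hstart]
  -- leaves of B
  have hdrop : heap.drop st = heap[st] :: heap.drop (st + 1) :=
    List.drop_eq_getElem_cons hstlt
  -- A's scan as a value fold over the dropped list
  rw [pv_val_of_index_fold]
  have hrange : ((st : Int) + 1 : Int) = ((st + 1 : Nat) : Int) := by push_cast; ring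
  have hA : (PySem.List.pyRange ((st : Int) + 1) (heap.length : Int) 1).foldl
      (fun a i => if PySem.List.pyGetD heap i 0 < a then PySem.List.pyGetD heap i 0 else a)
      (PySem.List.pyGetD heap (st : Int) 0)
      = (heap.drop (st + 1)).foldl (fun a i => if i < a then i else a)
          (PySem.List.pyGetD heap (st : Int) 0) := by
    rw [hrange]
    have := PySem.List.foldl_pyRange_pyGetD (xs := heap) (a := ((st + 1 : Nat) : Int)) (d := 0)
      (f := fun a i => if i < a then i else a) (init := PySem.List.pyGetD heap (st : Int) 0)
      (by positivity)
    simpa using this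
  rw [hA, pv_foldl_if_lt_eq_min]
  have hget : PySem.List.pyGetD heap (st : Int) 0 = heap[st] := by
    rw [PySem.List.pyGetD_natCast]
    exact List.getD_eq_getElem heap 0 hstlt
  rw [hget, hdrop, PySem.List.min?_id_cons]
  simp

-- ===== VERDICT (by name: the statement is the Claim_ definition above) =====
theorem delete_min_from_max_heap_spec : Claim_equal_delete_min_from_max_heap := by
  intro heap _
  unfold Spec_delete_min_from_max_heap
  by_cases hne : heap = []
  · subst hne; rfl
  · exact delete_min_spec_aux heap hne
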